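-- pv_equiv track=rewrite | github.com/IShkuropiy/python-exercises | basic/uniqueCharInStr.py | findUniqueChar
-- ===== SOURCE A (Python) =====
-- from collections import defaultdict
--
-- def findUniqueChar(s):
--     h = defaultdict(int)
--     letter = ''
--     count = 0 # how many unique chars we will found
--     result = -1
--
--     for letter in s:
--         h[letter] += 1
--
--     for i in range (len(s)):
--         if h[s[i]] == 1:
--            count +=1
--            if count == 2:
--               result = i
--               break
--
--     return result
-- ===== SOURCE B (Python) =====
-- def findUniqueChar(s):
--     once = {}   # chars currently seen exactly once -> index of their only occurrence
--     seen = set()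
--     for i, c in enumerate(s):
--         if c in seen:
--             once.pop(c, None)
--         else:
--             seen.add(c)
--             once[c] = i
--     idxs = list(once.values())
--     return idxs[1] if len(idxs) > 1 else -1
-- ===== Notes on version B (the rewrite author's own statement) =====
-- stated objective: alternative
-- what changed: Replaces A's frequency table plus second index scan with early break by a single pass that maintains an insertion-ordered dict of currently-unique characters (deleting a char on its repeat) and a seen set, then picks the second surviving index.
import Mathlib
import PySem

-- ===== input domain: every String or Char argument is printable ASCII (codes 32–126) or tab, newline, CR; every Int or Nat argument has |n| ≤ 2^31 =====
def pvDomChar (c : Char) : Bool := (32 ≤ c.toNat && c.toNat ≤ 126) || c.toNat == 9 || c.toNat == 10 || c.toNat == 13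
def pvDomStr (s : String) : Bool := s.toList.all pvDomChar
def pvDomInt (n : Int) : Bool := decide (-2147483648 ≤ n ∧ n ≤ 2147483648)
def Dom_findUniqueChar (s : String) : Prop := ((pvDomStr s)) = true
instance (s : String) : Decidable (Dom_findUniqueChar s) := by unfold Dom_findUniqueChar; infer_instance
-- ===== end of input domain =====

-- B drops A's count table and break-scan: one pass keeps an insertion-ordered dict of
-- currently-unique characters (deleted when the character repeats), then takes the
-- second surviving index (objective: alternative, same cost).

-- ===== PORT A =====
-- second loop of A: for i in range(len(s)): if h[s[i]] == 1: count += 1; if count == 2: result = i; break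
def findUniqueCharLoop (h : PySem.Dict Char Int) (cs : List Char) :
    List Int → Int → Int
  | [], _ => -1
  | i :: rest, count =>
    if h.getD (PySem.List.pyGetD cs i ' ') 0 == 1 then
      if count + 1 == 2 then i
      else findUniqueCharLoop h cs rest (count + 1)
    else findUniqueCharLoop h cs rest count

def findUniqueChar (s : String) : Int :=
  let cs := s.toList
  -- for letter in s: h[letter] += 1   (defaultdict(int))
  let h := cs.foldl (fun d c => d.modify c 0 (· + 1)) PySem.Dict.empty
  findUniqueCharLoop h cs (PySem.List.pyRange 0 cs.length 1) 0

-- ===== PORT B =====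
def findUniqueChar_alt (s : String) : Int :=
  let cs := s.toList
  -- for i, c in enumerate(s): if c in seen: once.pop(c, None) else: seen.add(c); once[c] = i
  let st := (PySem.List.enumerate cs 0).foldl
    (fun (st : PySem.Dict Char Int × PySem.Set Char) q =>
      if PySem.Set.contains st.2 q.2 then (st.1.erase q.2, st.2)
      else (st.1.insert q.2 q.1, PySem.Set.add st.2 q.2))
    (PySem.Dict.empty, PySem.Set.empty)
  let idxs := st.1.values
  if 1 < idxs.length then PySem.List.pyGetD idxs 1 (-1) else -1

-- ===== PRECONDITION & SPEC =====
def Spec_findUniqueChar (s : String) (out : Int) : Prop := out = findUniqueChar_alt s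
instance (s : String) (out : Int) : Decidable (Spec_findUniqueChar s out) := by unfold Spec_findUniqueChar; infer_instance

-- ===== CLAIM (what is proved, stated in full; the proofs are below) =====
def Claim_equal_findUniqueChar : Prop := ∀ (s : String), Dom_findUniqueChar s → Spec_findUniqueChar s (findUniqueChar s)

-- ===== LEMMAS AND PROOFS =====

-- the list of (index, char) pairs of the characters occurring exactly once in cs
def uniquePairs (cs : List Char) : List (Int × Char) :=
  (PySem.List.enumerate cs 0).filter (fun q => cs.count q.2 == 1)

-- B's loop state after the whole pass: the dict holds exactly the unique characters
-- (keyed by char, valued by index, in index order), the set holds all characters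
theorem snd_mem_of_mem_uniquePairs (cs : List Char) (q : Int × Char)
    (h : q ∈ uniquePairs cs) : q.2 ∈ cs := by
  unfold uniquePairs at h
  have h1 := List.mem_of_mem_filter h
  rw [PySem.List.mem_enumerate_iff] at h1
  obtain ⟨k, hk, rfl⟩ := h1
  simp

theorem uniquePairs_append_mem (t : List Char) (c : Char) (hc : c ∈ t) :
    uniquePairs (t ++ [c]) = (uniquePairs t).filter (fun q => !(q.2 == c)) := by
  unfold uniquePairs
  rw [PySem.List.enumerate_append, List.filter_append, List.filter_filter]
  have hlast : List.filter (fun q => ((t ++ [c]).count q.2 == 1))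
      (PySem.List.enumerate [c] (0 + t.length)) = [] := by
    have : (t ++ [c]).count c = t.count c + 1 := by simp
    have hge : 1 ≤ t.count c := List.one_le_count_iff.mpr hc
    simp [PySem.List.enumerate]
    omega
  rw [hlast, List.append_nil]
  apply List.filter_congr
  intro q _
  by_cases hqc : q.2 = c
  · have hge : 1 ≤ t.count c := List.one_le_count_iff.mpr hc
    simp [hqc, List.count_append]
    omega
  · simp [List.count_append, hqc, Ne.symm hqc]

theorem uniquePairs_append_not_mem (t : List Char) (c : Char) (hc : c ∉ t) :
    uniquePairs (t ++ [c]) = uniquePairs t ++ [((t.length : Int), c)] := by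
  unfold uniquePairs
  rw [PySem.List.enumerate_append, List.filter_append]
  congr 1
  · apply List.filter_congr
    intro q hq
    rw [PySem.List.mem_enumerate_iff] at hq
    obtain ⟨k, hk, rfl⟩ := hq
    have hne : t[k] ≠ c := fun h => hc (h ▸ List.getElem_mem hk)
    simp [List.count_append, Ne.symm hne]
  · have : (t ++ [c]).count c = t.count c + 1 := by simp
    have h0 : t.count c = 0 := List.count_eq_zero.mpr hc
    simp [PySem.List.enumerate, h0]

theorem alt_state_eq (cs : List Char) :
    (PySem.List.enumerate cs 0).foldl
      (fun (st : PySem.Dict Char Int × PySem.Set Char) q =>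
        if PySem.Set.contains st.2 q.2 then (st.1.erase q.2, st.2)
        else (st.1.insert q.2 q.1, PySem.Set.add st.2 q.2))
      (PySem.Dict.empty, PySem.Set.empty)
    = (PySem.Dict.mk ((uniquePairs cs).map (fun q => (q.2, q.1))), PySem.Set.ofList cs) := by
  induction cs using List.reverseRecOn with
  | nil => rfl
  | append_singleton t c ih =>
    rw [PySem.List.enumerate_append, List.foldl_append, ih]
    have hset : PySem.Set.ofList (t ++ [c]) = PySem.Set.add (PySem.Set.ofList t) c := by
      simp [PySem.Set.ofList_eq_foldl, List.foldl_append]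
    have hcont : PySem.Set.contains (PySem.Set.ofList t) c = decide (c ∈ t) := by
      simp [PySem.Set.contains, PySem.Set.mem_ofList]
    simp only [PySem.List.enumerate, List.foldl_cons, List.foldl_nil]
    by_cases hc : c ∈ t
    · rw [hcont]
      simp only [hc, decide_true, if_pos]
      have hadd : PySem.Set.add (PySem.Set.ofList t) c = PySem.Set.ofList t := by
        simp [PySem.Set.add, hc]
      rw [hset, hadd]
      congr 1
      -- dict: erase = filter on items
      show PySem.Dict.mk (((uniquePairs t).map (fun q => (q.2, q.1))).filter
        (fun p => !(p.1 == c))) = PySem.Dict.mk ((uniquePairs (t ++ [c])).map (fun q => (q.2, q.1)))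
      rw [uniquePairs_append_mem t c hc, List.filter_map]
      rfl
    · rw [hcont]
      simp only [hc, decide_false, Bool.false_eq_true, if_false]
      rw [hset]
      congr 1
      -- dict: insert appends a fresh key
      have hfresh : (PySem.Dict.mk ((uniquePairs t).map (fun q => (q.2, q.1)))).contains c = false := by
        simp only [PySem.Dict.contains, List.any_eq_false]
        intro p hp
        simp only [List.mem_map] at hp
        obtain ⟨q, hq, rfl⟩ := hp
        have hm := snd_mem_of_mem_uniquePairs t q hq
        have hne : q.2 ≠ c := fun h => hc (h ▸ hm)
        simp [hne]
      rw [PySem.Dict.insert]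
      simp only [hfresh, Bool.false_eq_true, if_false]
      rw [uniquePairs_append_not_mem t c hc, List.map_append]
      simp

-- ===== A-side: the break-scan returns the second matching index =====
def loopPairs (p : Char → Bool) : List (Int × Char) → Int → Int
  | [], _ => -1
  | q :: rest, count =>
    if p q.2 then
      if count + 1 == 2 then q.1 else loopPairs p rest (count + 1)
    else loopPairs p rest count

theorem findUniqueCharLoop_eq_loopPairs (h : PySem.Dict Char Int) (cs : List Char)
    (ixs : List Int) (count : Int) :
    findUniqueCharLoop h cs ixs count =
      loopPairs (fun c => h.getD c 0 == 1)
        (ixs.map (fun j => (j, PySem.List.pyGetD cs j ' '))) count := by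
  induction ixs generalizing count with
  | nil => rfl
  | cons i rest ih =>
    simp only [findUniqueCharLoop, loopPairs, List.map_cons]
    split_ifs <;> simp_all

-- with count = 1 the loop returns the FIRST matching index (or -1)
theorem loopPairs_one (p : Char → Bool) (l : List (Int × Char)) :
    loopPairs p l 1 = (((l.filter (fun q => p q.2)).map (·.1))[0]?).getD (-1) := by
  induction l with
  | nil => rfl
  | cons q rest ih =>
    simp only [loopPairs, List.filter_cons]
    by_cases hq : p q.2 <;> simp [hq, ih]

-- with count = 0 the loop returns the SECOND matching index (or -1)
theorem loopPairs_zero (p : Char → Bool) (l : List (Int × Char)) :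
    loopPairs p l 0 = (((l.filter (fun q => p q.2)).map (·.1))[1]?).getD (-1) := by
  induction l with
  | nil => rfl
  | cons q rest ih =>
    simp only [loopPairs, List.filter_cons]
    by_cases hq : p q.2 <;> simp [hq, ih, loopPairs_one]

-- ===== VERDICT (by name: the statement is the Claim_ definition above) =====
theorem findUniqueChar_spec : Claim_equal_findUniqueChar := by
  intro s _
  simp only [Spec_findUniqueChar, findUniqueChar, findUniqueChar_alt]
  rw [alt_state_eq]
  rw [findUniqueCharLoop_eq_loopPairs, loopPairs_zero]
  rw [show (PySem.List.pyRange 0 (s.toList.length) 1).map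
        (fun j => (j, PySem.List.pyGetD s.toList j ' '))
      = PySem.List.enumerate s.toList 0 from
    (PySem.List.enumerate_eq_map_pyRange s.toList ' ').symm]
  have hpred : ∀ q : Int × Char,
      ((s.toList.foldl (fun (d : PySem.Dict Char Int) c => d.modify c 0 (· + 1)) PySem.Dict.empty).getD q.2 0 == 1)
      = (s.toList.count q.2 == 1) := by
    intro q
    rw [PySem.Dict.getD_foldl_modify_add_one]
    simp [PySem.Dict.getD_empty]
  simp only [hpred]
  simp only [PySem.Dict.values, List.map_map]
  have hval : ((fun x : Char × Int => x.2) ∘ fun q : Int × Char => (q.2, q.1)) = (fun q : Int × Char => q.1) := rfl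
  rw [hval]
  set u := (uniquePairs s.toList).map (fun q : Int × Char => q.1) with hu
  have hLu : (List.filter (fun q : Int × Char => s.toList.count q.2 == 1)
      (PySem.List.enumerate s.toList 0)).map (fun x : Int × Char => x.1) = u := rfl
  rw [hLu]
  by_cases h2 : 1 < u.length
  · simp only [if_pos h2]
    rw [show PySem.List.pyGetD u 1 (-1) = u[1]'(by omega) from
      PySem.List.pyGetD_ofNat u 1 (-1) (by omega)]
    simp [List.getElem?_eq_getElem (by omega : 1 < u.length)]
  · simp only [if_neg h2]
    rw [List.getElem?_eq_none (by omega : u.length ≤ 1)]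
    rfl
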